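-- pv_equiv track=rewrite | github.com/brianmeyer/molly | evolution/skill_lifecycle.py | _summarize_values
-- ===== SOURCE A (Python) =====
-- def _summarize_values(values, limit=4):
--     compact = [str(v).strip() for v in values if str(v).strip()]
--     if not compact:
--         return "(none)"
--     if len(compact) <= limit:
--         return " | ".join(compact)
--     remaining = len(compact) - limit
--     return f"{' | '.join(compact[:limit])} | ... (+{remaining} more)"
-- ===== SOURCE B (Python) =====
-- def _summarize_values(values, limit=4):
--     # Pass 1: count the non-blank entries (no list is ever built).
--     total = 0
--     for v in values:
--         if str(v).strip():
--             total += 1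
--     if total == 0:
--         return "(none)"
--     shown = total if total <= limit else limit
--     # Pass 2: emit the output string directly, separator by separator,
--     # stopping as soon as `shown` entries have been written.
--     out = ""
--     emitted = 0
--     for v in values:
--         if emitted == shown:
--             break
--         s = str(v).strip()
--         if not s:
--             continue
--         if emitted == 0:
--             out = s
--         else:
--             out += " | " + s
--         emitted += 1
--     if total <= limit:
--         return out
--     return out + " | ... (+" + str(total - limit) + " more)"
-- ===== Notes on version B (the rewrite author's own statement) =====
-- stated objective: alternative
-- what changed: B never builds the filtered list: a first pass only counts non-blank entries, then a second pass writes the result string directly, concatenating separator-by-separator and stopping after min(total, limit) emissions, instead of A's list comprehension plus join/slice; Pre_ restricts to the natural domain limit >= 0, since for a negative limit A's negative-index slice and remaining = len+|limit| arithmetic are accidental.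
-- outside the precondition, e.g. on _summarize_values(['a', 'b', 'c'], -1): A returns 'a | b | ... (+4 more)', B returns 'a | b | c | ... (+4 more)'
import Mathlib
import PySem

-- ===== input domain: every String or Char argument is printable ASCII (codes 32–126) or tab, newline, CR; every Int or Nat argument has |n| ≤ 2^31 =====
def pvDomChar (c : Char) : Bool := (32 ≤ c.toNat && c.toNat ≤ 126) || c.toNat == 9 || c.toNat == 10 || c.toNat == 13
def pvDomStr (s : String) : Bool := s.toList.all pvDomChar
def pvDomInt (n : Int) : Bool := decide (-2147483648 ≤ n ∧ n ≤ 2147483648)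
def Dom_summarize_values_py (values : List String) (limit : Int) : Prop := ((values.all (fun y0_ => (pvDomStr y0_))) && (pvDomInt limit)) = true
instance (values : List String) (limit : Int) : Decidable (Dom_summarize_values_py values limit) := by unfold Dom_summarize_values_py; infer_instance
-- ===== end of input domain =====

-- B never materialises the filtered list: one pass counts the non-blank entries, a second pass
-- writes the result string directly, separator by separator, stopping after min(total, limit)
-- emissions (objective: alternative).

-- ===== PORT A =====
def summarize_values_py (values : List String) (limit : Int) : String :=
  let compact := (values.filter (fun v => PySem.Str.strip v ≠ "")).map (fun v => PySem.Str.strip v)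
  if compact = [] then "(none)"
  else if (compact.length : Int) ≤ limit then PySem.Str.join " | " compact
  else
    let remaining : Int := (compact.length : Int) - limit
    PySem.Str.join " | " (PySem.List.slice compact none (some limit)) ++ " | ... (+" ++ PySem.Int.toStr remaining ++ " more)"

-- ===== PORT B =====
-- the second Python loop (break when `emitted == shown`, skip blanks, concatenate)
def pvEmit (shown : Int) : List String → String → Int → String
  | [], out, _ => out
  | v :: t, out, emitted =>
    if emitted = shown then out
    else
      let s := PySem.Str.strip v
      if s = "" then pvEmit shown t out emitted
      else pvEmit shown t (if emitted = 0 then s else out ++ " | " ++ s) (emitted + 1)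

def summarize_values_py_alt (values : List String) (limit : Int) : String :=
  let total : Int := values.foldl (fun n v => if PySem.Str.strip v = "" then n else n + 1) 0
  if total = 0 then "(none)"
  else
    let shown := if total ≤ limit then total else limit
    let out := pvEmit shown values "" 0
    if total ≤ limit then out
    else out ++ " | ... (+" ++ PySem.Int.toStr (total - limit) ++ " more)"

-- ===== PRECONDITION & SPEC =====
-- Pre_ excludes negative limits (outside the function's natural domain): there A's value comes
-- from accidental negative-index slicing and 'remaining = len + |limit|' arithmetic.
def Pre_summarize_values_py (values : List String) (limit : Int) : Prop := 0 ≤ limit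
instance (values : List String) (limit : Int) : Decidable (Pre_summarize_values_py values limit) := by unfold Pre_summarize_values_py; infer_instance
def pvWitness_summarize_values_py : List String × Int := (["a", "  ", "b", "c"], 2)
def Spec_summarize_values_py (values : List String) (limit : Int) (out : String) : Prop := out = summarize_values_py_alt values limit
instance (values : List String) (limit : Int) (out : String) : Decidable (Spec_summarize_values_py values limit out) := by unfold Spec_summarize_values_py; infer_instance

-- ===== CLAIM (what is proved, stated in full; the proofs are below) =====
def Claim_equal_summarize_values_py : Prop := ∀ (values : List String) (limit : Int), Dom_summarize_values_py values limit → Pre_summarize_values_py values limit → Spec_summarize_values_py values limit (summarize_values_py values limit)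

-- ===== LEMMAS AND PROOFS =====

-- A's filtered/stripped list, used to state the loop invariants
def pvCompact (values : List String) : List String :=
  (values.filter (fun v => PySem.Str.strip v ≠ "")).map (fun v => PySem.Str.strip v)

-- the counting loop counts exactly the elements of pvCompact
theorem pv_count (xs : List String) (n : Int) :
    xs.foldl (fun n v => if PySem.Str.strip v = "" then n else n + 1) n
      = n + ((pvCompact xs).length : Int) := by
  induction xs generalizing n with
  | nil => simp [pvCompact]
  | cons v t ih =>
    by_cases h : PySem.Str.strip v = ""
    · simp only [List.foldl_cons, if_pos h]
      rw [ih]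
      simp [pvCompact, h]
    · simp only [List.foldl_cons, if_neg h]
      rw [ih]
      simp only [pvCompact, List.filter_cons, h]
      simp [h]
      push_cast
      ring

-- joining with " | " is folding string concatenation over the tail
theorem pv_join_step (c q : String) (rest : List String) :
    PySem.Str.join " | " ((c ++ " | " ++ q) :: rest) = PySem.Str.join " | " (c :: q :: rest) := by
  apply String.toList_inj.mp
  cases rest with
  | nil =>
    simp [PySem.Str.toList_join, PySem.Chars.join_singleton, PySem.Chars.join_cons_cons,
      String.toList_append]
  | cons r rs =>
    simp [PySem.Str.toList_join, PySem.Chars.join_cons_cons, String.toList_append]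

theorem pv_join_foldl (t : List String) (c : String) :
    t.foldl (fun a s => a ++ " | " ++ s) c = PySem.Str.join " | " (c :: t) := by
  induction t generalizing c with
  | nil =>
    apply String.toList_inj.mp
    simp [PySem.Str.toList_join, PySem.Chars.join_singleton]
  | cons q rest ih =>
    simp only [List.foldl_cons]
    rw [ih (c ++ " | " ++ q), pv_join_step]

-- the emit loop, once started (1 ≤ e), folds concatenation over the next (shown - e) compact entries
theorem pv_emit_run (shown : Int) (xs : List String) (out : String) (e : Int)
    (h1 : 1 ≤ e) (h2 : e ≤ shown) :
    pvEmit shown xs out e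
      = ((pvCompact xs).take (shown - e).toNat).foldl (fun a s => a ++ " | " ++ s) out := by
  induction xs generalizing out e with
  | nil => simp [pvEmit, pvCompact]
  | cons v t ih =>
    by_cases he : e = shown
    · have : (shown - e).toNat = 0 := by omega
      simp [pvEmit, he, this]
    · have hlt : e < shown := by omega
      by_cases hs : PySem.Str.strip v = ""
      · simp only [pvEmit, if_neg he, hs, if_true]
        rw [ih out e h1 h2]
        simp [pvCompact, hs]
      · have hne : ¬ e = 0 := by omega
        simp only [pvEmit, if_neg he, if_neg hs, if_neg hne]
        rw [ih _ (e + 1) (by omega) (by omega)]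
        have hk : (shown - e).toNat = (shown - (e + 1)).toNat + 1 := by omega
        simp [pvCompact, hs, hk, List.take_succ_cons]

-- the emit loop from its start: skip blanks, seed with the first compact entry, then pv_emit_run
theorem pv_emit_start (shown : Int) (hsh : 1 ≤ shown) (xs : List String) :
    pvEmit shown xs "" 0
      = (match pvCompact xs with
         | [] => ""
         | c :: t => (t.take (shown - 1).toNat).foldl (fun a s => a ++ " | " ++ s) c) := by
  induction xs with
  | nil => simp [pvEmit, pvCompact]
  | cons v t ih =>
    have h0 : ¬ (0 : Int) = shown := by omega
    by_cases hs : PySem.Str.strip v = ""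
    · simp only [pvEmit, if_neg h0, hs, if_true]
      rw [ih]
      simp [pvCompact, hs]
    · simp only [pvEmit, if_neg h0, if_neg hs, if_true, zero_add]
      rw [pv_emit_run shown t _ 1 le_rfl hsh]
      simp [pvCompact, hs]

-- when shown = 0 the loop breaks immediately (or never runs)
theorem pv_emit_zero (xs : List String) : pvEmit 0 xs "" 0 = "" := by
  cases xs <;> simp [pvEmit]

theorem pv_join_empty : PySem.Str.join " | " ([] : List String) = "" := by
  apply String.toList_inj.mp
  simp [PySem.Str.toList_join, PySem.Chars.join_nil]

-- ===== VERDICT (by name: the statement is the Claim_ definition above) =====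
theorem summarize_values_py_spec : Claim_equal_summarize_values_py := by
  intro values limit _ hpre
  unfold Spec_summarize_values_py summarize_values_py summarize_values_py_alt
  have hlim : (0 : Int) ≤ limit := hpre
  rw [pv_count values 0]
  simp only [zero_add]
  show (if pvCompact values = [] then "(none)"
        else if ((pvCompact values).length : Int) ≤ limit then PySem.Str.join " | " (pvCompact values)
        else PySem.Str.join " | " (PySem.List.slice (pvCompact values) none (some limit)) ++ " | ... (+" ++ PySem.Int.toStr (((pvCompact values).length : Int) - limit) ++ " more)")
      =
      (if ((pvCompact values).length : Int) = 0 then "(none)"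
       else if ((pvCompact values).length : Int) ≤ limit
         then pvEmit (if ((pvCompact values).length : Int) ≤ limit then ((pvCompact values).length : Int) else limit) values "" 0
         else pvEmit (if ((pvCompact values).length : Int) ≤ limit then ((pvCompact values).length : Int) else limit) values "" 0
              ++ " | ... (+" ++ PySem.Int.toStr (((pvCompact values).length : Int) - limit) ++ " more)")
  cases hc : pvCompact values with
  | nil => simp
  | cons c t =>
    have hne : ¬ (((c :: t).length : Nat) : Int) = 0 := by
      push_cast [List.length_cons]; omega
    have hnil : (c :: t : List String) ≠ [] := by simp
    rw [if_neg hnil, if_neg hne]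
    by_cases hle : (((c :: t).length : Nat) : Int) ≤ limit
    · rw [if_pos hle, if_pos hle, if_pos hle]
      have hsh : (1 : Int) ≤ (((c :: t).length : Nat) : Int) := by
        push_cast [List.length_cons]; omega
      rw [pv_emit_start _ hsh values, hc]
      have ht : ((((c :: t).length : Nat) : Int) - 1).toNat = t.length := by
        push_cast [List.length_cons]; omega
      rw [ht]
      show PySem.Str.join " | " (c :: t) = (t.take t.length).foldl (fun a s => a ++ " | " ++ s) c
      rw [List.take_of_length_le le_rfl, pv_join_foldl]
    · rw [if_neg hle, if_neg hle, if_neg hle]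
      have hslice : PySem.List.slice (c :: t) none (some limit) = (c :: t).take limit.toNat :=
        PySem.List.slice_to _ hlim
      by_cases h0 : limit = 0
      · subst h0
        rw [pv_emit_zero, hslice]
        simp [pv_join_empty]
      · have h1 : (1 : Int) ≤ limit := by omega
        rw [pv_emit_start _ h1 values, hc]
        have hk : limit.toNat = (limit - 1).toNat + 1 := by omega
        rw [hslice, hk, List.take_succ_cons]
        show PySem.Str.join " | " (c :: t.take (limit - 1).toNat) ++ " | ... (+" ++ PySem.Int.toStr ((((c :: t).length : Nat) : Int) - limit) ++ " more)"
          = (t.take (limit - 1).toNat).foldl (fun a s => a ++ " | " ++ s) c ++ " | ... (+" ++ PySem.Int.toStr ((((c :: t).length : Nat) : Int) - limit) ++ " more)"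
        rw [pv_join_foldl]
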